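-- pv_equiv track=rewrite | github.com/m4rk-git/RAP-inspired-test-suite-generation | src/search_config.py | _format_missing_lines
-- ===== SOURCE A (Python) =====
-- def _format_missing_lines(missing_lines: list) -> str:
--     if not missing_lines:
--         return "None"
--
--     sorted_lines = sorted(list(missing_lines))
--     ranges = []
--     range_start = sorted_lines[0]
--     prev = sorted_lines[0]
--
--     for curr in sorted_lines[1:]:
--         if curr == prev + 1:
--             prev = curr
--         else:
--             if range_start == prev:
--                 ranges.append(str(range_start))
--             else:
--                 ranges.append(f"{range_start}-{prev}")
--             range_start = curr
--             prev = curr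
--
--     if range_start == prev:
--         ranges.append(str(range_start))
--     else:
--         ranges.append(f"{range_start}-{prev}")
--
--     return ", ".join(ranges)
-- ===== SOURCE B (Python) =====
-- def _runs(xs):
--     # divide and conquer: run pairs of each half, merged at the boundary
--     if len(xs) == 1:
--         return [(xs[0], xs[0])]
--     mid = len(xs) // 2
--     left, right = _runs(xs[:mid]), _runs(xs[mid:])
--     (la, lb), (ra, rb) = left[-1], right[0]
--     if ra == lb + 1:
--         return left[:-1] + [(la, rb)] + right[1:]
--     return left + right
--
--
-- def _format_missing_lines(missing_lines: list) -> str: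
--     if not missing_lines:
--         return "None"
--     parts = [str(a) if a == b else f"{a}-{b}"
--              for a, b in _runs(sorted(missing_lines))]
--     return ", ".join(parts)
-- ===== Notes on version B (the rewrite author's own statement) =====
-- stated objective: alternative
-- what changed: Replaces A's left-to-right range_start/prev state machine by a divide-and-conquer: recursively compute the (first,last) run pairs of each half of the sorted list and merge the two halves at the boundary, joining the halves' border runs when the right half's first value extends the left half's last run by one; formatting is a separate mapping pass.
import Mathlib
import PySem

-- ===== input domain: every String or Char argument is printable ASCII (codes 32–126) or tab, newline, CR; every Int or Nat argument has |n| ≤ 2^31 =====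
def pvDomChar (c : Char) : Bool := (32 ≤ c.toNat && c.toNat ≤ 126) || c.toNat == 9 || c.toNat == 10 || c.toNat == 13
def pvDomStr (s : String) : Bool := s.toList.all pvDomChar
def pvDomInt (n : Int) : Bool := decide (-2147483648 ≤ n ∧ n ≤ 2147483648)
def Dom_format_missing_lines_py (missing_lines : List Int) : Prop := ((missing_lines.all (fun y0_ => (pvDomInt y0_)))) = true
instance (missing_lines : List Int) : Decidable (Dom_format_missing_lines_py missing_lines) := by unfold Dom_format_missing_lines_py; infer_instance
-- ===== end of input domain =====

-- B replaces A's left-to-right range_start/prev state machine by divide and conquer: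
-- run pairs of each half of the sorted list, merged at the boundary; same cost, alternative algorithm.

-- ===== PORT A =====
-- the for-loop over sorted_lines[1:], threading (ranges, range_start, prev); the trailing
-- if/else flush is the [] case
def pvALoop (l : List Int) (ranges : List String) (range_start prev : Int) : List String :=
  match l with
  | [] =>
    if range_start = prev then ranges ++ [PySem.Int.toStr range_start]
    else ranges ++ [PySem.Int.toStr range_start ++ "-" ++ PySem.Int.toStr prev]
  | curr :: rest =>
    if curr = prev + 1 then pvALoop rest ranges range_start curr
    else
      if range_start = prev then pvALoop rest (ranges ++ [PySem.Int.toStr range_start]) curr curr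
      else pvALoop rest (ranges ++ [PySem.Int.toStr range_start ++ "-" ++ PySem.Int.toStr prev]) curr curr

def format_missing_lines_py (missing_lines : List Int) : String :=
  if missing_lines = [] then "None"
  else
    match PySem.List.sorted missing_lines (fun x => x) false with
    | [] => "None"  -- unreachable: sorted of a nonempty list is nonempty
    | h :: t => PySem.Str.join ", " (pvALoop t [] h h)

-- ===== PORT B =====
-- Source B's _runs: divide and conquer over a nonempty list; xs[:mid]/xs[mid:] with
-- 0 ≤ mid ≤ len(xs) are exactly List.take/List.drop, len(xs)//2 on a Nat length is
-- Nat division. Python's left[-1]/right[0] destructuring is the match (both sides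
-- are nonempty, so the fallback arm is unreachable).
def pvRunsDC (xs : List Int) : List (Int × Int) :=
  match xs with
  | [] => []          -- unreachable: _runs is only called on nonempty lists
  | [x] => [(x, x)]
  | x :: y :: rest =>
    let mid := (x :: y :: rest).length / 2
    let L := pvRunsDC ((x :: y :: rest).take mid)
    let R := pvRunsDC ((x :: y :: rest).drop mid)
    match L.getLast?, R.head? with
    | some (la, lb), some (ra, rb) =>
      if ra = lb + 1 then L.dropLast ++ [(la, rb)] ++ R.tail else L ++ R
    | _, _ => L ++ R
  termination_by xs.length
  decreasing_by
  · simp [List.length_take]; omega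
  · simp [List.length_drop]; omega

def format_missing_lines_py_alt (missing_lines : List Int) : String :=
  if missing_lines = [] then "None"
  else
    let parts := (pvRunsDC (PySem.List.sorted missing_lines (fun x => x) false)).map
      (fun p => if p.1 = p.2 then PySem.Int.toStr p.1
                else PySem.Int.toStr p.1 ++ "-" ++ PySem.Int.toStr p.2)
    PySem.Str.join ", " parts

-- ===== PRECONDITION & SPEC =====
def Spec_format_missing_lines_py (missing_lines : List Int) (out : String) : Prop := out = format_missing_lines_py_alt missing_lines
instance (missing_lines : List Int) (out : String) : Decidable (Spec_format_missing_lines_py missing_lines out) := by unfold Spec_format_missing_lines_py; infer_instance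

-- ===== CLAIM (what is proved, stated in full; the proofs are below) =====
def Claim_equal_format_missing_lines_py : Prop := ∀ (missing_lines : List Int), Dom_format_missing_lines_py missing_lines → Spec_format_missing_lines_py missing_lines (format_missing_lines_py missing_lines)

-- ===== LEMMAS AND PROOFS =====

-- the maximal +1 runs of a list, starting from an open run (a, b)
def pvRuns (a b : Int) : List Int → List (Int × Int)
  | [] => [(a, b)]
  | v :: rest => if v = b + 1 then pvRuns a v rest else (a, b) :: pvRuns v v rest

def pvFmt (p : Int × Int) : String :=
  if p.1 = p.2 then PySem.Int.toStr p.1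
  else PySem.Int.toStr p.1 ++ "-" ++ PySem.Int.toStr p.2

theorem pvALoop_eq_runs (l : List Int) (ranges : List String) (a b : Int) :
    pvALoop l ranges a b = ranges ++ (pvRuns a b l).map pvFmt := by
  induction l generalizing ranges a b with
  | nil => by_cases h : a = b <;> simp [pvALoop, pvRuns, pvFmt, h]
  | cons v rest ih =>
    by_cases h1 : v = b + 1
    · simp [pvALoop, pvRuns, h1, ih]
    · by_cases h2 : a = b <;>
        simp [pvALoop, pvRuns, h1, h2, ih, pvFmt, List.append_assoc]

theorem pvRuns_ne_nil (a b : Int) (l : List Int) : pvRuns a b l ≠ [] := by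
  induction l generalizing a b with
  | nil => simp [pvRuns]
  | cons v rest ih => by_cases h : v = b + 1 <;> simp [pvRuns, h, ih]

-- the end of the first run and the remaining runs (independent of the start a)
def pvFirstEnd (b : Int) : List Int → Int
  | [] => b
  | v :: r => if v = b + 1 then pvFirstEnd v r else b

def pvRest (b : Int) : List Int → List (Int × Int)
  | [] => []
  | v :: r => if v = b + 1 then pvRest v r else pvRuns v v r

theorem pvGetLast?_cons {α : Type} (a : α) (l : List α) (h : l ≠ []) :
    (a :: l).getLast? = l.getLast? := by
  cases l with
  | nil => exact absurd rfl h
  | cons b m => exact List.getLast?_cons_cons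

theorem pvDropLast_concat {α : Type} (l : List α) (x : α) (h : l.getLast? = some x) :
    l.dropLast ++ [x] = l := by
  induction l with
  | nil => simp at h
  | cons a m ih =>
    cases m with
    | nil => simp_all
    | cons b k =>
      rw [List.getLast?_cons_cons] at h
      simpa using congrArg (a :: ·) (ih h)

theorem pvRuns_eq (a b : Int) (l : List Int) :
    pvRuns a b l = (a, pvFirstEnd b l) :: pvRest b l := by
  induction l generalizing b with
  | nil => simp [pvRuns, pvFirstEnd, pvRest]
  | cons v r ih => by_cases h : v = b + 1 <;> simp [pvRuns, pvFirstEnd, pvRest, h, ih]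

-- splitting pvRuns at an append boundary
theorem pvRuns_append (l : List Int) (a b v : Int) (m : List Int) :
    pvRuns a b (l ++ v :: m) =
      (pvRuns a b l).dropLast ++
        (match (pvRuns a b l).getLast? with
         | some (c, d) => if v = d + 1 then pvRuns c v m else (c, d) :: pvRuns v v m
         | none => []) := by
  induction l generalizing a b with
  | nil => by_cases h : v = b + 1 <;> simp [pvRuns, h]
  | cons w l' ih =>
    by_cases h : w = b + 1
    · simp only [List.cons_append, pvRuns, if_pos h]
      exact ih a w
    · simp only [List.cons_append, pvRuns, if_neg h]
      rw [ih w w]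
      have hne := pvRuns_ne_nil w w l'
      rw [List.dropLast_cons_of_ne_nil hne, pvGetLast?_cons _ _ hne]
      simp

theorem pvRunsDC_eq (x : Int) (t : List Int) : pvRunsDC (x :: t) = pvRuns x x t := by
  induction hn : (x :: t).length using Nat.strong_induction_on generalizing x t with
  | _ n ih =>
  match t with
  | [] => simp [pvRunsDC, pvRuns]
  | y :: rest =>
    rw [pvRunsDC]
    have hlen : (x :: y :: rest).length = rest.length + 2 := by simp
    set mid := (x :: y :: rest).length / 2 with hmid
    have hm1 : 1 ≤ mid := by omega
    have hm2 : mid < (x :: y :: rest).length := by omega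
    -- take mid = x :: t1, drop mid = u :: t2, with t1 ++ u :: t2 = y :: rest
    obtain ⟨t1, ht1⟩ : ∃ t1, (x :: y :: rest).take mid = x :: t1 := by
      match hm : mid with
      | m + 1 => exact ⟨(y :: rest).take m, by simp⟩
    obtain ⟨u, t2, ht2⟩ : ∃ u t2, (x :: y :: rest).drop mid = u :: t2 := by
      have : (x :: y :: rest).drop mid ≠ [] := by
        intro h
        have := congrArg List.length h
        simp [List.length_drop] at this
        omega
      match hd : (x :: y :: rest).drop mid with
      | [] => exact absurd hd this
      | u :: t2 => exact ⟨u, t2, rfl⟩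
    have hsplit : x :: (t1 ++ u :: t2) = x :: y :: rest := by
      have := List.take_append_drop mid (x :: y :: rest)
      rw [ht1, ht2] at this
      simpa using this
    have hn' : rest.length + 2 = n := by simpa using hn
    have hL : pvRunsDC ((x :: y :: rest).take mid) = pvRuns x x t1 := by
      rw [ht1]
      refine ih (x :: t1).length ?_ x t1 rfl
      have h1 := congrArg List.length ht1
      simp only [List.length_take, List.length_cons] at h1 ⊢
      omega
    have hR : pvRunsDC ((x :: y :: rest).drop mid) = pvRuns u u t2 := by
      rw [ht2]
      refine ih (u :: t2).length ?_ u t2 rfl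
      have h2 := congrArg List.length ht2
      simp only [List.length_drop, List.length_cons] at h2 ⊢
      omega
    have htail : t1 ++ u :: t2 = y :: rest := by
      injection hsplit
    rw [hL, hR, ← htail]
    rw [pvRuns_append t1 x x u t2]
    -- analyse getLast? of the left runs and head? of the right runs
    obtain ⟨c, d, hlast⟩ : ∃ c d, (pvRuns x x t1).getLast? = some (c, d) := by
      match hLne : (pvRuns x x t1).getLast? with
      | some (c, d) => exact ⟨c, d, rfl⟩
      | none =>
        exact absurd (List.getLast?_eq_none_iff.mp hLne) (pvRuns_ne_nil x x t1)
    have hhead : (pvRuns u u t2).head? = some (u, pvFirstEnd u t2) := by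
      rw [pvRuns_eq]; rfl
    rw [hlast, hhead]
    by_cases hc : u = d + 1
    · simp only [if_pos hc]
      rw [pvRuns_eq c u t2, pvRuns_eq u u t2]
      simp
    · simp only [if_neg hc]
      rw [pvRuns_eq u u t2, ← pvDropLast_concat _ _ hlast]
      simp

-- ===== VERDICT (by name: the statement is the Claim_ definition above) =====
theorem format_missing_lines_py_spec : Claim_equal_format_missing_lines_py := by
  intro ml _
  unfold Spec_format_missing_lines_py format_missing_lines_py format_missing_lines_py_alt
  by_cases hml : ml = []
  · simp [hml]
  · simp only [if_neg hml]
    cases hs : PySem.List.sorted ml (fun x => x) false with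
    | nil =>
      have hp := PySem.List.sorted_perm (xs := ml) (key := fun x => x) (rev := false)
      rw [hs] at hp
      exact absurd hp.symm.eq_nil hml
    | cons h t =>
      show PySem.Str.join ", " (pvALoop t [] h h) = _
      rw [pvRunsDC_eq, pvALoop_eq_runs]
      rfl
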